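-- pv_equiv track=rewrite | github.com/yu2799/AtCoder | abc/250/210/204C.py | bfs
-- ===== SOURCE A (Python) =====
-- from collections import deque
--
-- def bfs(graph, n):
--     res = n
--     for i in range(n):
--         dist = [-1] * n
--         dist[i] = 0
--         next_visit = deque([i])
--         while next_visit:
--             cur = next_visit.popleft()
--             for i in graph[cur]:
--                 if dist[i] > -1:
--                     continue
--                 dist[i] = dist[cur] + 1
--                 next_visit.append(i)
--                 res = res + 1
--     return res
-- ===== SOURCE B (Python) =====
-- def bfs(graph, n):
--     total = n
--     for s in range(n):
--         seen = [False] * n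
--
--         def dfs(u):
--             seen[u] = True
--             c = 0
--             for v in graph[u]:
--                 if not seen[v]:
--                     c += 1 + dfs(v)
--             return c
--
--         total += dfs(s)
--     return total
-- ===== Notes on version B (the rewrite author's own statement) =====
-- stated objective: alternative
-- what changed: Per-source iterative BFS with a deque and a distance array accumulating a shared counter is replaced by a per-source recursive DFS helper over a boolean seen array that returns the count of newly reached nodes, summed per source.
-- outside the precondition, e.g. on bfs([[-1], []], 2): A returns 3, B returns 3
import Mathlib
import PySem

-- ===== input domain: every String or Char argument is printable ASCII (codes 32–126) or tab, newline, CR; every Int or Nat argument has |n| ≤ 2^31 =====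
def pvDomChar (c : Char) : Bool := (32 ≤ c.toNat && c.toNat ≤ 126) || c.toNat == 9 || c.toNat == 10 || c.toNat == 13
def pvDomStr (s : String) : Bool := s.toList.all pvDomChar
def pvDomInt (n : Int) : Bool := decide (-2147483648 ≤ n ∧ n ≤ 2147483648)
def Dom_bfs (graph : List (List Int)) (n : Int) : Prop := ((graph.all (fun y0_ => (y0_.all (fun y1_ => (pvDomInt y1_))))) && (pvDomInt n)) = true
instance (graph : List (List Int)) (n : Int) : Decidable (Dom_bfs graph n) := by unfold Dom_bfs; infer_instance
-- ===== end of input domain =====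

-- B replaces the per-source deque BFS with distance bookkeeping by a per-source recursive
-- DFS helper over a boolean seen array returning the count of newly reached nodes
-- (alternative decomposition, same asymptotic cost).

-- ===== PORT A =====
-- inner `for i in graph[cur]` loop of A (state: dist, queue, res)
def bfsScan (dist : List Int) (cur : Int) (nbrs : List Int) (queue : List Int) (res : Int) :
    List Int × List Int × Int :=
  nbrs.foldl (fun s j =>
      if s.1.getD j.toNat 0 > -1 then s
      else (s.1.set j.toNat (s.1.getD cur.toNat 0 + 1), s.2.1 ++ [j], s.2.2 + 1))
    (dist, queue, res)

-- `while next_visit:` loop of A; fuel only totalises the loop (proved sufficient under Pre_)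
def bfsLoop (g : List (List Int)) : Nat → List Int → List Int → Int → List Int × Int
  | 0, dist, _, res => (dist, res)
  | fuel+1, dist, queue, res =>
    match queue with
    | [] => (dist, res)
    | cur :: rest =>
      let s := bfsScan dist cur (g.getD cur.toNat []) rest res
      bfsLoop g fuel s.1 s.2.1 s.2.2

def bfs (graph : List (List Int)) (n : Int) : Int :=
  (PySem.List.pyRange 0 n 1).foldl (fun res i =>
      (bfsLoop graph (n.toNat + 1) ((List.replicate n.toNat (-1)).set i.toNat 0) [i] res).2)
    n

-- ===== PORT B =====
-- recursive helper `dfs(u)` of B: marks u, recurses into unseen neighbours, returns the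
-- count of newly marked nodes other than u; fuel only totalises the recursion
def dfsGo (g : List (List Int)) : Nat → List Bool → Int → List Bool × Int
  | 0, seen, _ => (seen, 0)
  | fuel+1, seen, u =>
    (g.getD u.toNat []).foldl (fun s v =>
        if s.1.getD v.toNat true then s
        else
          let r := dfsGo g fuel s.1 v
          (r.1, s.2 + 1 + r.2))
      (seen.set u.toNat true, 0)

def bfs_alt (graph : List (List Int)) (n : Int) : Int :=
  (PySem.List.pyRange 0 n 1).foldl (fun total s =>
      total + (dfsGo graph (n.toNat + 1) (List.replicate n.toNat false) s).2)
    n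

-- ===== PRECONDITION & SPEC =====
-- Pre_ excludes (for n > 0) graphs shorter than n — A then hits graph[cur] with cur ≥ len and
-- raises IndexError — and neighbour entries outside [0, n): entries ≥ n or < -n make A raise
-- IndexError at dist[i], while entries in [-n, 0) rely on Python's negative-index wraparound,
-- a defensible-corner accident of the list encoding (A and B happen to agree there; see cites).
def Pre_bfs (graph : List (List Int)) (n : Int) : Prop :=
  0 < n → (n ≤ graph.length ∧ ∀ row ∈ graph.take n.toNat, ∀ j ∈ row, 0 ≤ j ∧ j < n)
instance (graph : List (List Int)) (n : Int) : Decidable (Pre_bfs graph n) := by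
  unfold Pre_bfs; infer_instance

def pvWitness_bfs : List (List Int) × Int := ([[1], []], 2)

def Spec_bfs (graph : List (List Int)) (n : Int) (out : Int) : Prop := out = bfs_alt graph n
instance (graph : List (List Int)) (n : Int) (out : Int) : Decidable (Spec_bfs graph n out) := by
  unfold Spec_bfs; infer_instance

-- ===== CLAIM (what is proved, stated in full; the proofs are below) =====
def Claim_equal_bfs : Prop := ∀ (graph : List (List Int)) (n : Int), Dom_bfs graph n → Pre_bfs graph n → Spec_bfs graph n (bfs graph n)

-- ===== LEMMAS AND PROOFS =====

-- adjacency row of node u, exactly as both ports read it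
def Adj (g : List (List Int)) (u : Int) : List Int := g.getD u.toNat []

-- reachability in the graph (the common semantics both traversals compute)
def Reach (g : List (List Int)) (i v : Int) : Prop :=
  Relation.ReflTransGen (fun a b => b ∈ Adj g a) i v

-- all nodes in [0,n) have all their neighbours in [0,n)
def OkG (g : List (List Int)) (n : Int) : Prop :=
  ∀ u : Int, 0 ≤ u → u < n → ∀ v ∈ Adj g u, 0 ≤ v ∧ v < n

-- visited predicates, exactly as the ports' guards read them
def VisA (dist : List Int) (v : Int) : Prop := dist.getD v.toNat 0 > -1
def VisB (seen : List Bool) (v : Int) : Prop := seen.getD v.toNat true = true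

def cntA (dist : List Int) : Nat := dist.countP (fun x => decide (x > -1))
def cntB (seen : List Bool) : Nat := seen.countP (fun b => b)

lemma getD_set_self {α : Type} (xs : List α) (j : Nat) (v d : α) (h : j < xs.length) :
    (xs.set j v).getD j d = v := by
  simp [List.getD_eq_getElem?_getD, h]

lemma getD_set_ne {α : Type} (xs : List α) (j k : Nat) (v d : α) (h : j ≠ k) :
    (xs.set j v).getD k d = xs.getD k d := by
  simp [List.getD_eq_getElem?_getD, h]

lemma getD_replicate' {α : Type} (n k : Nat) (a d : α) (h : k < n) :
    (List.replicate n a).getD k d = a := by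
  simp [List.getD_eq_getElem?_getD, h]

lemma okG_of_pre (g : List (List Int)) (n : Int) (hn : 0 < n) (hlen : n ≤ g.length)
    (h : ∀ row ∈ g.take n.toNat, ∀ j ∈ row, 0 ≤ j ∧ j < n) : OkG g n := by
  intro u hu0 hun v hv
  have hug : u.toNat < g.length := by omega
  have hrow : Adj g u = g[u.toNat] := by
    simp [Adj, List.getD_eq_getElem?_getD, List.getElem?_eq_getElem hug]
  have hmem : g[u.toNat] ∈ g.take n.toNat := by
    have h1 : u.toNat < (g.take n.toNat).length := by simp; omega
    have := List.getElem_mem h1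
    simpa [List.getElem_take] using this
  exact h _ hmem v (by rwa [hrow] at hv)

-- generic positional counting lemmas
lemma countP_pointwise_eq {α β : Type} (p : α → Bool) (q : β → Bool) (dx : α) (dy : β) :
    ∀ (xs : List α) (ys : List β), xs.length = ys.length →
      (∀ j, j < xs.length → p (xs.getD j dx) = q (ys.getD j dy)) →
      xs.countP p = ys.countP q := by
  intro xs
  induction xs with
  | nil => intro ys h _; simp_all [List.length_eq_zero_iff.mp h.symm]
  | cons x xs ih =>
    intro ys h hp
    cases ys with
    | nil => simp at h
    | cons y ys =>
      have h0 := hp 0 (by simp)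
      simp only [List.getD_cons_zero] at h0
      have := ih ys (by simpa using h) (fun j hj => by
        have := hp (j+1) (by simpa using Nat.succ_lt_succ hj)
        simpa using this)
      simp [List.countP_cons, this, h0]

lemma countP_set_incr {α : Type} (p : α → Bool) (d : α) :
    ∀ (xs : List α) (j : Nat) (v : α), j < xs.length → p (xs.getD j d) = false → p v = true →
      (xs.set j v).countP p = xs.countP p + 1 := by
  intro xs
  induction xs with
  | nil => intro j v h; simp at h
  | cons x xs ih =>
    intro j v hj hold hnew
    cases j with
    | zero => simp_all
    | succ j =>
      simp only [List.getD_cons_succ] at hold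
      simp [List.countP_cons, ih j v (by simpa using hj) hold hnew]
      omega

lemma cntB_mono' (xs ys : List Bool) (hlen : xs.length = ys.length)
    (h : ∀ j, j < xs.length → xs.getD j true = true → ys.getD j true = true) :
    cntB xs ≤ cntB ys := by
  unfold cntB
  induction xs generalizing ys with
  | nil => simp
  | cons x xs ih =>
    cases ys with
    | nil => simp at hlen
    | cons y ys =>
      have h0 := h 0 (by simp)
      have := ih ys (by simpa using hlen) (fun j hj => by
        have := h (j+1) (by simpa using Nat.succ_lt_succ hj)
        simpa using this)
      simp only [List.countP_cons]
      simp only [List.getD_cons_zero] at h0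
      cases x <;> cases y <;> simp_all
      omega

lemma cntB_lt_of_unseen (seen : List Bool) (k : Nat) (hk : k < seen.length)
    (h : seen.getD k true = false) : cntB seen < seen.length := by
  have hmem : seen[k] ∈ seen := List.getElem_mem hk
  have hfalse : seen[k] = false := by rwa [List.getD_eq_getElem _ _ hk] at h
  by_contra hle
  have heq : cntB seen = seen.length := le_antisymm List.countP_le_length (by omega)
  have := (List.countP_eq_length).mp heq seen[k] hmem
  simp [hfalse] at this

-- a set containing i and closed under Adj (on [0,n)) contains everything reachable from i
lemma reach_subset (g : List (List Int)) (n : Int) (hg : OkG g n) (i : Int)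
    (hi0 : 0 ≤ i) (hin : i < n) (P : Int → Prop) (hPi : P i)
    (hcl : ∀ u, 0 ≤ u → u < n → P u → ∀ w ∈ Adj g u, P w) :
    ∀ v, Reach g i v → 0 ≤ v ∧ v < n ∧ P v := by
  intro v hv
  induction hv with
  | refl => exact ⟨hi0, hin, hPi⟩
  | tail hab hbc ih =>
    obtain ⟨h0, h1, hP⟩ := ih
    obtain ⟨c0, c1⟩ := hg _ h0 h1 _ hbc
    exact ⟨c0, c1, hcl _ h0 h1 hP _ hbc⟩

-- ---------- A side ----------
structure InvA (g : List (List Int)) (n i res0 : Int) (F : List Int)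
    (dist : List Int) (q : List Int) (res : Int) : Prop where
  len : dist.length = n.toNat
  qm : ∀ v ∈ q, 0 ≤ v ∧ v < n ∧ VisA dist v
  srcV : VisA dist i
  reach : ∀ v, 0 ≤ v → v < n → VisA dist v → Reach g i v
  closed : ∀ u, 0 ≤ u → u < n → VisA dist u → u ∉ F → ∀ w ∈ Adj g u, VisA dist w
  cnt : res = res0 + (cntA dist : Int) - 1

lemma scanA (g : List (List Int)) (n i res0 : Int) (cur : Int) (hRcur : Reach g i cur) :
    ∀ (nbrs : List Int), (∀ v ∈ nbrs, 0 ≤ v ∧ v < n) → (∀ v ∈ nbrs, v ∈ Adj g cur) →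
    ∀ dist q res, InvA g n i res0 (cur :: q) dist q res → VisA dist cur →
      InvA g n i res0 (cur :: (bfsScan dist cur nbrs q res).2.1)
          (bfsScan dist cur nbrs q res).1 (bfsScan dist cur nbrs q res).2.1
          (bfsScan dist cur nbrs q res).2.2 ∧
      (∀ v ∈ nbrs, VisA (bfsScan dist cur nbrs q res).1 v) ∧
      (∀ v, VisA dist v → VisA (bfsScan dist cur nbrs q res).1 v) ∧
      VisA (bfsScan dist cur nbrs q res).1 cur ∧
      cntA (bfsScan dist cur nbrs q res).1 + q.length
        = cntA dist + (bfsScan dist cur nbrs q res).2.1.length := by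
  intro nbrs
  induction nbrs with
  | nil =>
    intro _ _ dist q res hInv hVcur
    exact ⟨hInv, by simp, fun v h => h, hVcur, by simp [bfsScan]⟩
  | cons j nbrs ih =>
    intro hrange hadj dist q res hInv hVcur
    have hstep : bfsScan dist cur (j :: nbrs) q res
        = if dist.getD j.toNat 0 > -1 then bfsScan dist cur nbrs q res
          else bfsScan (dist.set j.toNat (dist.getD cur.toNat 0 + 1)) cur nbrs (q ++ [j]) (res + 1) := by
      show List.foldl _ (if dist.getD j.toNat 0 > -1 then (dist, q, res)
          else (dist.set j.toNat (dist.getD cur.toNat 0 + 1), q ++ [j], res + 1)) nbrs = _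
      rw [apply_ite (fun s : List Int × List Int × Int => List.foldl (fun s j =>
          if s.1.getD j.toNat 0 > -1 then s
          else (s.1.set j.toNat (s.1.getD cur.toNat 0 + 1), s.2.1 ++ [j], s.2.2 + 1)) s nbrs)]
      rfl
    by_cases hg : dist.getD j.toNat 0 > -1
    · rw [hstep, if_pos hg]
      obtain ⟨h1, h2, h3, h4, h5⟩ := ih (fun v hv => hrange v (by simp [hv]))
        (fun v hv => hadj v (by simp [hv])) dist q res hInv hVcur
      refine ⟨h1, ?_, h3, h4, h5⟩
      intro v hv
      rcases List.mem_cons.mp hv with rfl | hv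
      · exact h3 v hg
      · exact h2 v hv
    · rw [hstep, if_neg hg]
      obtain ⟨hj0, hjn⟩ := hrange j (by simp)
      have hjA : j ∈ Adj g cur := hadj j (by simp)
      have hjl : j.toNat < dist.length := by rw [hInv.len]; omega
      set w := dist.getD cur.toNat 0 + 1 with hw
      have hwpos : w > -1 := by
        have := hVcur
        unfold VisA at this
        omega
      set dist2 := dist.set j.toNat w with hd2
      have hVj : VisA dist2 j := by
        unfold VisA
        rw [hd2, getD_set_self _ _ _ _ hjl]; exact hwpos
      have hmono : ∀ v, VisA dist v → VisA dist2 v := by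
        intro v hv
        by_cases hvj : j.toNat = v.toNat
        · unfold VisA at hv ⊢
          rw [hd2, ← hvj] at *
          rw [getD_set_self _ _ _ _ hjl]; exact hwpos
        · unfold VisA at hv ⊢
          rw [hd2, getD_set_ne _ _ _ _ _ hvj]; exact hv
      have hvnew : ∀ v : Int, 0 ≤ v → VisA dist2 v → v ≠ j → VisA dist v := by
        intro v hv0 hv hvj
        have hne : j.toNat ≠ v.toNat := by
          intro h; apply hvj; omega
        unfold VisA at hv ⊢
        rwa [hd2, getD_set_ne _ _ _ _ _ hne] at hv
      have hInv2 : InvA g n i res0 (cur :: (q ++ [j])) dist2 (q ++ [j]) (res + 1) := by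
        constructor
        · rw [hd2, List.length_set, hInv.len]
        · intro v hv
          rcases List.mem_append.mp hv with hv | hv
          · obtain ⟨a, b, c⟩ := hInv.qm v hv
            exact ⟨a, b, hmono v c⟩
          · simp at hv; subst hv
            exact ⟨hj0, hjn, hVj⟩
        · exact hmono i hInv.srcV
        · intro v hv0 hvn hv
          by_cases hvj : v = j
          · subst hvj; exact hRcur.tail hjA
          · exact hInv.reach v hv0 hvn (hvnew v hv0 hv hvj)
        · intro u hu0 hun hu hF w' hw'
          have huj : u ≠ j := by
            intro h; subst h
            exact hF (by simp)
          have huF : u ∉ cur :: q := by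
            intro h
            apply hF
            rcases List.mem_cons.mp h with h | h
            · simp [h]
            · simp [h]
          exact hmono _ (hInv.closed u hu0 hun (hvnew u hu0 hu huj) huF w' hw')
        · have : cntA dist2 = cntA dist + 1 := by
            unfold cntA
            rw [hd2]
            exact countP_set_incr _ 0 dist j.toNat w hjl (by simpa using hg) (by simpa using hwpos)
          rw [hInv.cnt, this]
          push_cast
          ring
      have hVcur2 : VisA dist2 cur := hmono cur hVcur
      obtain ⟨h1, h2, h3, h4, h5⟩ := ih (fun v hv => hrange v (by simp [hv]))
        (fun v hv => hadj v (by simp [hv])) dist2 (q ++ [j]) (res + 1) hInv2 hVcur2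
      have hcnt2 : cntA dist2 = cntA dist + 1 := by
        unfold cntA
        rw [hd2]
        exact countP_set_incr _ 0 dist j.toNat w hjl (by simpa using hg) (by simpa using hwpos)
      refine ⟨h1, ?_, fun v hv => h3 v (hmono v hv), h4, ?_⟩
      · intro v hv
        rcases List.mem_cons.mp hv with rfl | hv
        · exact h3 v hVj
        · exact h2 v hv
      · simp only [List.length_append, List.length_cons, List.length_nil] at h5 ⊢
        omega

lemma loopA (g : List (List Int)) (n i res0 : Int) (hg : OkG g n) :
    ∀ (fuel : Nat) (dist q : List Int) (res : Int), InvA g n i res0 q dist q res →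
      (dist.length - cntA dist) + q.length < fuel →
      ∃ d', bfsLoop g fuel dist q res = (d', res0 + (cntA d' : Int) - 1) ∧
        InvA g n i res0 [] d' [] (res0 + (cntA d' : Int) - 1) := by
  intro fuel
  induction fuel with
  | zero => intro dist q res _ h; omega
  | succ fuel ih =>
    intro dist q res hInv hfuel
    cases q with
    | nil =>
      refine ⟨dist, ?_, ?_⟩
      · show (dist, res) = _
        rw [hInv.cnt]
      · rw [← hInv.cnt]; exact hInv
    | cons cur rest =>
      obtain ⟨hc0, hcn, hcV⟩ := hInv.qm cur (by simp)
      have hRcur : Reach g i cur := hInv.reach cur hc0 hcn hcV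
      have hInv' : InvA g n i res0 (cur :: rest) dist rest res :=
        ⟨hInv.len, fun v hv => hInv.qm v (by simp [hv]), hInv.srcV, hInv.reach,
         hInv.closed, hInv.cnt⟩
      obtain ⟨h1, h2, h3, h4, h5⟩ := scanA g n i res0 cur hRcur (Adj g cur)
        (fun v hv => hg cur hc0 hcn v hv) (fun v hv => hv) dist rest res hInv' hcV
      set s := bfsScan dist cur (Adj g cur) rest res with hs
      have hInv2 : InvA g n i res0 s.2.1 s.1 s.2.1 s.2.2 := by
        refine ⟨h1.len, h1.qm, h1.srcV, h1.reach, ?_, h1.cnt⟩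
        intro u hu0 hun huV huF w hw
        by_cases hucur : u = cur
        · subst hucur
          exact h2 w hw
        · exact h1.closed u hu0 hun huV (by simp [hucur, huF]) w hw
      have hlen' : s.1.length = dist.length := by rw [h1.len, hInv.len]
      have hle : cntA s.1 ≤ s.1.length := List.countP_le_length
      have hstep : bfsLoop g (fuel+1) dist (cur :: rest) res
          = bfsLoop g fuel s.1 s.2.1 s.2.2 := by
        rfl
      rw [hstep]
      exact ih s.1 s.2.1 s.2.2 hInv2 (by
        simp only [List.length_cons] at hfuel
        omega)

-- ---------- B side ----------
structure InvB (g : List (List Int)) (n u : Int) (seen1 : List Bool)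
    (s : List Bool × Int) : Prop where
  len : s.1.length = seen1.length
  mono : ∀ v, VisB seen1 v → VisB s.1 v
  newR : ∀ v, 0 ≤ v → v < n → VisB s.1 v → ¬ VisB seen1 v → Reach g u v
  newC : ∀ v, 0 ≤ v → v < n → VisB s.1 v → ¬ VisB seen1 v → ∀ w ∈ Adj g v, VisB s.1 w
  cnt : s.2 = (cntB s.1 : Int) - (cntB seen1 : Int)

lemma dfsB (g : List (List Int)) (n : Int) (hg : OkG g n) :
    ∀ (fuel : Nat) (seen : List Bool) (u : Int), seen.length = n.toNat →
      0 ≤ u → u < n → ¬ VisB seen u → seen.length - cntB seen < fuel →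
      (dfsGo g fuel seen u).1.length = seen.length ∧
      (∀ v, VisB seen v → VisB (dfsGo g fuel seen u).1 v) ∧
      VisB (dfsGo g fuel seen u).1 u ∧
      (∀ v, 0 ≤ v → v < n → VisB (dfsGo g fuel seen u).1 v → ¬ VisB seen v → Reach g u v) ∧
      (∀ v, 0 ≤ v → v < n → VisB (dfsGo g fuel seen u).1 v → ¬ VisB seen v →
         ∀ w ∈ Adj g v, VisB (dfsGo g fuel seen u).1 w) ∧
      (dfsGo g fuel seen u).2 = (cntB (dfsGo g fuel seen u).1 : Int) - (cntB seen : Int) - 1 ∧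
      cntB seen < cntB (dfsGo g fuel seen u).1 := by
  intro fuel
  induction fuel with
  | zero =>
    intro seen u hlen hu0 hun hunseen hfuel
    have hkl : u.toNat < seen.length := by omega
    have hfalse : seen.getD u.toNat true = false := by
      unfold VisB at hunseen
      simpa using hunseen
    have := cntB_lt_of_unseen seen u.toNat hkl hfalse
    omega
  | succ fuel ih =>
    intro seen u hlen hu0 hun hunseen hfuel
    have hkl : u.toNat < seen.length := by omega
    have hfalse : seen.getD u.toNat true = false := by
      unfold VisB at hunseen
      simpa using hunseen
    have hcntlt : cntB seen < seen.length := cntB_lt_of_unseen seen u.toNat hkl hfalse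
    set seen1 := seen.set u.toNat true with hseen1
    have hlen1 : seen1.length = seen.length := by rw [hseen1, List.length_set]
    have hcnt1 : cntB seen1 = cntB seen + 1 := by
      unfold cntB
      exact countP_set_incr _ true seen u.toNat true hkl (by simpa using hfalse) rfl
    have hmono1 : ∀ v, VisB seen v → VisB seen1 v := by
      intro v hv
      by_cases hvu : u.toNat = v.toNat
      · unfold VisB
        rw [hseen1, ← hvu, getD_set_self _ _ _ _ hkl]
      · unfold VisB at hv ⊢
        rw [hseen1, getD_set_ne _ _ _ _ _ hvu]; exact hv
    -- the fold
    have hfold : ∀ (l : List Int), (∀ v ∈ l, v ∈ Adj g u) →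
        ∀ s : List Bool × Int, InvB g n u seen1 s →
        InvB g n u seen1 (l.foldl (fun s v =>
            if s.1.getD v.toNat true then s
            else ((dfsGo g fuel s.1 v).1, s.2 + 1 + (dfsGo g fuel s.1 v).2)) s) ∧
        (∀ v ∈ l, VisB (l.foldl (fun s v =>
            if s.1.getD v.toNat true then s
            else ((dfsGo g fuel s.1 v).1, s.2 + 1 + (dfsGo g fuel s.1 v).2)) s).1 v) ∧
        (∀ w, VisB s.1 w → VisB (l.foldl (fun s v =>
            if s.1.getD v.toNat true then s
            else ((dfsGo g fuel s.1 v).1, s.2 + 1 + (dfsGo g fuel s.1 v).2)) s).1 w) := by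
      intro l
      induction l with
      | nil => intro _ s hs; exact ⟨hs, by simp, fun w hw => hw⟩
      | cons v l ihl =>
        intro hladj s hs
        have hvadj : v ∈ Adj g u := hladj v (by simp)
        obtain ⟨hv0, hvn⟩ := hg u hu0 hun v hvadj
        simp only [List.foldl_cons]
        by_cases hgv : s.1.getD v.toNat true = true
        · rw [if_pos hgv]
          obtain ⟨hI, hall, hmo⟩ := ihl (fun w hw => hladj w (by simp [hw])) s hs
          refine ⟨hI, ?_, hmo⟩
          intro w hw
          rcases List.mem_cons.mp hw with rfl | hw
          · exact hmo w hgv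
          · exact hall w hw
        · rw [if_neg hgv]
          have hgv' : s.1.getD v.toNat true = false := by
            simpa using hgv
          have hcmono : cntB seen1 ≤ cntB s.1 :=
            cntB_mono' seen1 s.1 hs.len.symm (fun j hj hjt => by
              have := hs.mono (j : Int) (by simpa [VisB] using hjt)
              simpa [VisB] using this)
          have hs1len : s.1.length = n.toNat := by rw [hs.len, hlen1, hlen]
          obtain ⟨s1len, s1mono, s1vis, s1reach, s1closed, s1cnt, s1lt⟩ :=
            ih s.1 v hs1len hv0 hvn (by unfold VisB; rw [hgv']; simp) (by omega)
          have hInv' : InvB g n u seen1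
              ((dfsGo g fuel s.1 v).1, s.2 + 1 + (dfsGo g fuel s.1 v).2) := by
            constructor
            · rw [s1len, hs.len]
            · exact fun w hw => s1mono w (hs.mono w hw)
            · intro w hw0 hwn hwv hwn1
              by_cases hws : VisB s.1 w
              · exact hs.newR w hw0 hwn hws hwn1
              · exact Relation.ReflTransGen.head hvadj (s1reach w hw0 hwn hwv hws)
            · intro w hw0 hwn hwv hwn1 x hx
              by_cases hws : VisB s.1 w
              · exact s1mono x (hs.newC w hw0 hwn hws hwn1 x hx)
              · exact s1closed w hw0 hwn hwv hws x hx
            · show s.2 + 1 + (dfsGo g fuel s.1 v).2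
                  = ((cntB (dfsGo g fuel s.1 v).1 : Int)) - (cntB seen1 : Int)
              have h1 := hs.cnt
              have h2 := s1cnt
              omega
          obtain ⟨hI, hall, hmo⟩ := ihl (fun w hw => hladj w (by simp [hw]))
            ((dfsGo g fuel s.1 v).1, s.2 + 1 + (dfsGo g fuel s.1 v).2) hInv'
          refine ⟨hI, ?_, fun w hw => hmo w (s1mono w hw)⟩
          intro w hw
          rcases List.mem_cons.mp hw with rfl | hw
          · exact hmo w s1vis
          · exact hall w hw
    -- assemble
    have hstep : dfsGo g (fuel+1) seen u
        = (Adj g u).foldl (fun s v =>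
            if s.1.getD v.toNat true then s
            else ((dfsGo g fuel s.1 v).1, s.2 + 1 + (dfsGo g fuel s.1 v).2)) (seen1, 0) := by
      rfl
    have hInv0 : InvB g n u seen1 (seen1, 0) := by
      refine ⟨rfl, fun v h => h, ?_, ?_, by simp⟩
      · intro v _ _ hv hnv; exact absurd hv hnv
      · intro v _ _ hv hnv; exact absurd hv hnv
    obtain ⟨hI, hall, hmo⟩ := hfold (Adj g u) (fun v hv => hv) (seen1, 0) hInv0
    rw [hstep]
    set out := (Adj g u).foldl (fun s v =>
        if s.1.getD v.toNat true then s
        else ((dfsGo g fuel s.1 v).1, s.2 + 1 + (dfsGo g fuel s.1 v).2)) (seen1, 0) with hout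
    have hVu1 : VisB seen1 u := by
      unfold VisB
      rw [hseen1, getD_set_self _ _ _ _ hkl]
    have hseeneq : ∀ v : Int, v.toNat ≠ u.toNat → (VisB seen1 v ↔ VisB seen v) := by
      intro v hv
      unfold VisB
      rw [hseen1, getD_set_ne _ _ _ _ _ (fun h => hv h.symm)]
    refine ⟨by rw [hI.len, hlen1], ?_, hI.mono u hVu1, ?_, ?_, ?_, ?_⟩
    · exact fun v hv => hI.mono v (hmono1 v hv)
    · intro v hv0 hvn hvout hvseen
      by_cases hvu : v.toNat = u.toNat
      · have : v = u := by omega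
        subst this
        exact Relation.ReflTransGen.refl
      · exact hI.newR v hv0 hvn hvout (fun h => hvseen ((hseeneq v hvu).mp h))
    · intro v hv0 hvn hvout hvseen w hw
      by_cases hvu : v.toNat = u.toNat
      · have : v = u := by omega
        subst this
        exact hall w hw
      · exact hI.newC v hv0 hvn hvout (fun h => hvseen ((hseeneq v hvu).mp h)) w hw
    · have := hI.cnt
      omega
    · have : cntB seen1 ≤ cntB out.1 :=
        cntB_mono' seen1 out.1 hI.len.symm (fun j hj hjt => by
          have := hI.mono (j : Int) (by simpa [VisB] using hjt)
          simpa [VisB] using this)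
      omega

-- ---------- per-source equality ----------
lemma per_source (g : List (List Int)) (n : Int) (hg : OkG g n)
    (i : Int) (hi0 : 0 ≤ i) (hin : i < n) (res : Int) :
    (bfsLoop g (n.toNat + 1) ((List.replicate n.toNat (-1)).set i.toNat 0) [i] res).2
      = res + (dfsGo g (n.toNat + 1) (List.replicate n.toNat false) i).2 := by
  have hil : i.toNat < n.toNat := by omega
  set dist0 := (List.replicate n.toNat ((-1 : Int))).set i.toNat 0 with hd0
  have hlen0 : dist0.length = n.toNat := by
    rw [hd0, List.length_set, List.length_replicate]
  have hVi : VisA dist0 i := by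
    unfold VisA
    rw [hd0, getD_set_self _ _ _ _ (by simpa using hil)]
    omega
  have hVonly : ∀ v : Int, 0 ≤ v → v < n → VisA dist0 v → v = i := by
    intro v hv0 hvn hv
    by_contra hne
    have hnev : i.toNat ≠ v.toNat := fun h => hne (by omega)
    unfold VisA at hv
    rw [hd0, getD_set_ne _ _ _ _ _ hnev, getD_replicate' _ _ _ _ (by omega)] at hv
    omega
  have hcnt0 : cntA dist0 = 1 := by
    unfold cntA
    rw [hd0, countP_set_incr _ 0 _ i.toNat 0 (by simpa using hil)
      (by rw [getD_replicate' _ _ _ _ hil]; simp) (by simp)]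
    simp
  have hInv0 : InvA g n i res [i] dist0 [i] res := by
    refine ⟨hlen0, ?_, hVi, ?_, ?_, by rw [hcnt0]; push_cast; ring⟩
    · intro v hv
      simp at hv; subst hv
      exact ⟨hi0, hin, hVi⟩
    · intro v hv0 hvn hv
      rw [hVonly v hv0 hvn hv]
      exact Relation.ReflTransGen.refl
    · intro u hu0 hun hu hF
      exact absurd (by simp [hVonly u hu0 hun hu]) hF
  obtain ⟨d', hrun, hInvF⟩ := loopA g n i res hg (n.toNat + 1) dist0 [i] res hInv0
    (by rw [hlen0, hcnt0]; simp; omega)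
  set seen0 := List.replicate n.toNat false with hs0
  have hlens0 : seen0.length = n.toNat := by rw [hs0, List.length_replicate]
  have hs0unseen : ∀ v : Int, 0 ≤ v → v < n → ¬ VisB seen0 v := by
    intro v hv0 hvn hv
    unfold VisB at hv
    rw [hs0, getD_replicate' _ _ _ _ (by omega)] at hv
    exact Bool.false_ne_true hv
  have hcb0 : cntB seen0 = 0 := by
    unfold cntB
    rw [hs0]
    simp
  obtain ⟨b1, b2, b3, b4, b5, b6, b7⟩ := dfsB g n hg (n.toNat + 1) seen0 i hlens0 hi0 hin
    (hs0unseen i hi0 hin) (by omega)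
  set out := (dfsGo g (n.toNat + 1) seen0 i) with houtdef
  -- both visited sets are exactly the reachable set, hence the counts agree
  have hAiff : ∀ v : Int, 0 ≤ v → v < n → (VisA d' v ↔ Reach g i v) := by
    intro v hv0 hvn
    constructor
    · exact hInvF.reach v hv0 hvn
    · intro hr
      exact (reach_subset g n hg i hi0 hin (VisA d') hInvF.srcV
        (fun u h0 h1 hP => hInvF.closed u h0 h1 hP (by simp)) v hr).2.2
  have hBiff : ∀ v : Int, 0 ≤ v → v < n → (VisB out.1 v ↔ Reach g i v) := by
    intro v hv0 hvn
    constructor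
    · intro hv
      exact b4 v hv0 hvn hv (hs0unseen v hv0 hvn)
    · intro hr
      exact (reach_subset g n hg i hi0 hin (VisB out.1) b3
        (fun u h0 h1 hP => b5 u h0 h1 hP (hs0unseen u h0 h1)) v hr).2.2
  have hcnteq : cntA d' = cntB out.1 := by
    unfold cntA cntB
    apply countP_pointwise_eq _ _ 0 true d' out.1
    · rw [hInvF.len, b1, hlens0]
    · intro j hj
      have hj' : j < n.toNat := by rw [← hInvF.len]; exact hj
      have hj0 : (0 : Int) ≤ (j : Int) := by positivity
      have hjn : (j : Int) < n := by omega
      have hA := hAiff (j : Int) hj0 hjn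
      have hB := hBiff (j : Int) hj0 hjn
      unfold VisA at hA
      unfold VisB at hB
      simp only [Int.toNat_natCast] at hA hB
      by_cases hr : Reach g i (j : Int)
      · rw [decide_eq_true (hA.mpr hr), hB.mpr hr]
      · have h1 : ¬ (d'.getD j 0 > -1) := fun h => hr (hA.mp h)
        have h2 : out.1.getD j true = false := by
          have := fun h => hr (hB.mp h)
          simpa using this
        rw [h2, decide_eq_false h1]
  rw [hrun]
  rw [b6, hcnteq, hcb0]
  push_cast
  ring

-- ===== VERDICT (by name: the statement is the Claim_ definition above) =====
theorem bfs_spec : Claim_equal_bfs := by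
  intro graph n _ hPre
  unfold Spec_bfs bfs bfs_alt
  by_cases hn : 0 < n
  · obtain ⟨hlen, hrows⟩ := hPre hn
    have hg : OkG graph n := okG_of_pre graph n hn hlen hrows
    apply PySem.List.foldl_congr_mem
    intro acc i hi
    rw [PySem.List.mem_pyRange_one] at hi
    exact per_source graph n hg i hi.1 hi.2 acc
  · have : PySem.List.pyRange 0 n 1 = [] := by
      simp [PySem.List.pyRange]
      omega
    rw [this]
    rfl
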